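-- pv_equiv track=rewrite | github.com/zenoxetine/rvc-infer | my_utils.py | valid_dir_or_filename
-- ===== SOURCE A (Python) =====
-- def remove_last_if_its_a_space(text):
--     if (text[-1] == " "):
--         text = text[:-1]
--         return remove_last_if_its_a_space(text)
--     else:
--         return text
--
-- def valid_dir_or_filename(name):
--     notAllowedCharacter = ['\\', '/', ':', '*', '?', '"', '<', '>', '|', '.']
--     for charTest in notAllowedCharacter:
--         if (charTest in name):
--             if (charTest == '/'):
--                 name = name.replace('/', " (or) ")
--             else:
--                 name = name.replace(charTest, "")
--     name = remove_last_if_its_a_space(name)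
--     return name
-- ===== SOURCE B (Python) =====
-- def valid_dir_or_filename(name):
--     # One pass: each char is looked up in a replacement table built once;
--     # then trailing spaces are stripped (A raises IndexError when nothing is left; B returns '').
--     repl = {'\\': '', '/': ' (or) ', ':': '', '*': '', '?': '', '"': '',
--             '<': '', '>': '', '|': '', '.': ''}
--     out = []
--     for ch in name:
--         out.append(repl.get(ch, ch))
--     return ''.join(out).rstrip(' ')
-- ===== Notes on version B (the rewrite author's own statement) =====
-- stated objective: idiomatic
-- what changed: A scans the whole string once per forbidden character (ten sequential replace passes) and strips trailing spaces with a recursive helper; B builds a replacement table once, makes a single pass over the characters, and strips trailing spaces from the right.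
import Mathlib
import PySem

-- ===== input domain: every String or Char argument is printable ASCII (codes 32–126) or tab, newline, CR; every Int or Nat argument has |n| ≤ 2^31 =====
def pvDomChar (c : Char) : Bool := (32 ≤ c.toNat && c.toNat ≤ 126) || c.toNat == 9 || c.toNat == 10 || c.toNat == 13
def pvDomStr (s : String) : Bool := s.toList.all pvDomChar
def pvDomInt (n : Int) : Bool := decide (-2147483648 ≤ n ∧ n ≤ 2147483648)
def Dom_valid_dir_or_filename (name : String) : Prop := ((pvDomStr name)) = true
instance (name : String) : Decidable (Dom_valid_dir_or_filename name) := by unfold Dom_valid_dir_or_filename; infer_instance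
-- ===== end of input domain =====

-- B replaces A's ten sequential whole-string replace passes with one pass over the characters
-- using a replacement table built once (objective: idiomatic single traversal).

-- ===== PORT A =====
def remove_last_if_its_a_space (text : List Char) : Option (List Char) :=
  match h : PySem.List.pyGet? text (-1) with
  | none => none  -- text[-1] raises IndexError on the empty string
  | some c =>
    if c = ' ' then remove_last_if_its_a_space (PySem.List.slice text none (some (-1)))
    else some text
termination_by text.length
decreasing_by
  rw [PySem.List.slice_to_neg_one]
  rw [PySem.List.pyGet?_neg_one] at h
  cases text with
  | nil => simp at h
  | cons a t => simp [List.length_dropLast]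

def valid_dir_or_filename (name : String) : String :=
  let notAllowedCharacter : List Char := ['\\', '/', ':', '*', '?', '"', '<', '>', '|', '.']
  let name1 := notAllowedCharacter.foldl (fun n charTest =>
    if PySem.Str.isIn (String.mk [charTest]) n then
      if charTest = '/' then PySem.Str.replace n "/" " (or) "
      else PySem.Str.replace n (String.mk [charTest]) ""
    else n) name
  match remove_last_if_its_a_space name1.toList with
  | some t => String.mk t
  | none => ""   -- Python raises IndexError here; excluded by Pre_

-- ===== PORT B =====
-- hand port of s.rstrip(' ') (strip only the space character from the right); exact
def pyRstripSpace (l : List Char) : List Char := (l.reverse.dropWhile (fun c => c = ' ')).reverse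

def valid_dir_or_filename_alt (name : String) : String :=
  let repl : PySem.Dict Char String := PySem.Dict.mk
    [('\\', ""), ('/', " (or) "), (':', ""), ('*', ""), ('?', ""), ('"', ""),
     ('<', ""), ('>', ""), ('|', ""), ('.', "")]
  let out : List String := name.toList.foldl (fun acc ch => acc ++ [repl.getD ch (String.mk [ch])]) []
  String.mk (pyRstripSpace (PySem.Str.join "" out).toList)

-- ===== PRECONDITION & SPEC =====
-- Pre_ excludes exactly the inputs on which A raises IndexError: strings whose characters are all
-- spaces or removed characters, so that nothing non-space is left before the trailing-space strip.
def Pre_valid_dir_or_filename (name : String) : Prop :=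
  name.toList.any (fun c => !([' ', '\\', ':', '*', '?', '"', '<', '>', '|', '.'].contains c)) = true
instance (name : String) : Decidable (Pre_valid_dir_or_filename name) := by
  unfold Pre_valid_dir_or_filename; infer_instance

def pvWitness_valid_dir_or_filename : String := "a/b."

def Spec_valid_dir_or_filename (name : String) (out : String) : Prop := out = valid_dir_or_filename_alt name
instance (name : String) (out : String) : Decidable (Spec_valid_dir_or_filename name out) := by unfold Spec_valid_dir_or_filename; infer_instance

-- ===== CLAIM (what is proved, stated in full; the proofs are below) =====
def Claim_equal_valid_dir_or_filename : Prop := ∀ (name : String), Dom_valid_dir_or_filename name → Pre_valid_dir_or_filename name → Spec_valid_dir_or_filename name (valid_dir_or_filename name)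

-- ===== LEMMAS AND PROOFS =====

-- the common per-character mapping both cores compute
def chMap (c : Char) : List Char :=
  if c = '\\' then [] else if c = '/' then (" (or) ").toList else if c = ':' then []
  else if c = '*' then [] else if c = '?' then [] else if c = '"' then []
  else if c = '<' then [] else if c = '>' then [] else if c = '|' then []
  else if c = '.' then [] else [c]

theorem replace_go_single (d : Char) (new : List Char) :
    ∀ (l : List Char) (fuel : Nat) (acc : List Char), l.length ≤ fuel →
      PySem.Chars.replace.go [d] new fuel l acc
        = acc.reverse ++ l.flatMap (fun c => if c = d then new else [c]) := by
  intro l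
  induction l with
  | nil => intro fuel acc _; cases fuel <;> simp [PySem.Chars.replace.go]
  | cons c t ih =>
    intro fuel acc hf
    cases fuel with
    | zero => simp at hf
    | succ f =>
      by_cases hcd : c = d
      · subst hcd
        simp [PySem.Chars.replace.go, List.isPrefixOf, ih f (new.reverse ++ acc) (by simpa using hf)]
      · simp [PySem.Chars.replace.go, List.isPrefixOf, hcd, Ne.symm hcd,
          ih f (c :: acc) (by simpa using hf)]

theorem replace_single (l : List Char) (d : Char) (new : List Char) :
    PySem.Chars.replace l [d] new = l.flatMap (fun c => if c = d then new else [c]) := by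
  rw [PySem.Chars.replace]
  simp [replace_go_single d new l l.length [] le_rfl]

theorem flatMap_id_of_not_mem (l : List Char) (d : Char) (new : List Char) (h : d ∉ l) :
    l.flatMap (fun c => if c = d then new else [c]) = l := by
  induction l with
  | nil => rfl
  | cons c t ih =>
    simp only [List.mem_cons, not_or] at h
    simp [List.flatMap_cons, Ne.symm, h.1, ih h.2]

theorem step_eq (n : String) (d : Char) (new : String) :
    (if PySem.Str.isIn (String.mk [d]) n then PySem.Str.replace n (String.mk [d]) new else n).toList
      = n.toList.flatMap (fun c => if c = d then new.toList else [c]) := by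
  have hd : (String.mk [d]).toList = [d] := Eq.symm ((fun {l} {s} => String.ofList_eq.mp) rfl)
  by_cases hc : PySem.Chars.isIn [d] n.toList = true
  · simp [PySem.Str.isIn, PySem.Str.replace, hd, hc, replace_single]
  · have hnm : d ∉ n.toList := by
      intro hm
      rw [Bool.not_eq_true, PySem.Chars.isIn_eq_false_iff] at hc
      obtain ⟨s, t, hst⟩ := List.append_of_mem hm
      exact hc ⟨s, t, by rw [hst]; simp⟩
    simp [PySem.Str.isIn, hd, hc, flatMap_id_of_not_mem _ _ _ hnm]

-- per-character effect of one pass of A's loop (the '/'-branch included)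
def gch (d c : Char) : List Char :=
  if c = d then (if d = '/' then (" (or) ").toList else []) else [c]

-- composed per-character effect of A's passes for a list of forbidden chars
def Gfun : List Char → Char → List Char
  | [], c => [c]
  | d :: ds, c => (gch d c).flatMap (Gfun ds)

theorem step_eq' (n : String) (d : Char) :
    (if PySem.Str.isIn (String.mk [d]) n then
        (if d = '/' then PySem.Str.replace n "/" " (or) "
         else PySem.Str.replace n (String.mk [d]) "")
      else n).toList = n.toList.flatMap (gch d) := by
  by_cases hd : d = '/'
  · subst hd
    have h := step_eq n '/' " (or) "
    simp only [show ("/" : String) = String.mk ['/'] from rfl] at *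
    simpa [gch] using h
  · have hg : gch d = fun c => if c = d then [] else [c] := by
      funext c; simp [gch, hd]
    have h := step_eq n d ""
    simp only [hd, if_false, hg]
    simpa using h

theorem foldl_steps (cs : List Char) : ∀ (n : String),
    (cs.foldl (fun n charTest =>
      if PySem.Str.isIn (String.mk [charTest]) n then
        if charTest = '/' then PySem.Str.replace n "/" " (or) "
        else PySem.Str.replace n (String.mk [charTest]) ""
      else n) n).toList = n.toList.flatMap (Gfun cs) := by
  induction cs with
  | nil => intro n; simp [Gfun]
  | cons d ds ih =>
    intro n
    rw [List.foldl_cons, ih, step_eq', List.flatMap_assoc]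
    rfl

theorem Gfun_eq_chMap : Gfun ['\\', '/', ':', '*', '?', '"', '<', '>', '|', '.'] = chMap := by
  funext c
  by_cases h1 : c = '\\'; · subst h1; decide
  by_cases h2 : c = '/'; · subst h2; decide
  by_cases h3 : c = ':'; · subst h3; decide
  by_cases h4 : c = '*'; · subst h4; decide
  by_cases h5 : c = '?'; · subst h5; decide
  by_cases h6 : c = '"'; · subst h6; decide
  by_cases h7 : c = '<'; · subst h7; decide
  by_cases h8 : c = '>'; · subst h8; decide
  by_cases h9 : c = '|'; · subst h9; decide
  by_cases h10 : c = '.'; · subst h10; decide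
  simp [Gfun, gch, chMap, h1, h2, h3, h4, h5, h6, h7, h8, h9, h10]

theorem Acore_eq (name : String) :
    ((['\\', '/', ':', '*', '?', '"', '<', '>', '|', '.'] : List Char).foldl (fun n charTest =>
      if PySem.Str.isIn (String.mk [charTest]) n then
        if charTest = '/' then PySem.Str.replace n "/" " (or) "
        else PySem.Str.replace n (String.mk [charTest]) ""
      else n) name).toList = name.toList.flatMap chMap := by
  rw [foldl_steps, Gfun_eq_chMap]

theorem charsJoin_nil_flatten (L : List (List Char)) : PySem.Chars.join [] L = L.flatten := by
  simp only [PySem.Chars.join, List.intercalate]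
  induction L with
  | nil => simp
  | cons a t ih => cases t <;> simp_all [List.intersperse]

theorem getD_toList (ch : Char) :
    ((PySem.Dict.mk
      [('\\', ""), ('/', " (or) "), (':', ""), ('*', ""), ('?', ""), ('"', ""),
       ('<', ""), ('>', ""), ('|', ""), ('.', "")] : PySem.Dict Char String).getD ch
        (String.mk [ch])).toList = chMap ch := by
  by_cases h1 : ch = '\\'; · subst h1; decide
  by_cases h2 : ch = '/'; · subst h2; decide
  by_cases h3 : ch = ':'; · subst h3; decide
  by_cases h4 : ch = '*'; · subst h4; decide
  by_cases h5 : ch = '?'; · subst h5; decide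
  by_cases h6 : ch = '"'; · subst h6; decide
  by_cases h7 : ch = '<'; · subst h7; decide
  by_cases h8 : ch = '>'; · subst h8; decide
  by_cases h9 : ch = '|'; · subst h9; decide
  by_cases h10 : ch = '.'; · subst h10; decide
  have hd : (String.mk [ch]).toList = [ch] := Eq.symm ((fun {l} {s} => String.ofList_eq.mp) rfl)
  have c1 : (('\\' : Char) == ch) = false := by rw [beq_eq_false_iff_ne]; exact fun hh => h1 hh.symm
  have c2 : (('/' : Char) == ch) = false := by rw [beq_eq_false_iff_ne]; exact fun hh => h2 hh.symm
  have c3 : ((':' : Char) == ch) = false := by rw [beq_eq_false_iff_ne]; exact fun hh => h3 hh.symm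
  have c4 : (('*' : Char) == ch) = false := by rw [beq_eq_false_iff_ne]; exact fun hh => h4 hh.symm
  have c5 : (('?' : Char) == ch) = false := by rw [beq_eq_false_iff_ne]; exact fun hh => h5 hh.symm
  have c6 : (('"' : Char) == ch) = false := by rw [beq_eq_false_iff_ne]; exact fun hh => h6 hh.symm
  have c7 : (('<' : Char) == ch) = false := by rw [beq_eq_false_iff_ne]; exact fun hh => h7 hh.symm
  have c8 : (('>' : Char) == ch) = false := by rw [beq_eq_false_iff_ne]; exact fun hh => h8 hh.symm
  have c9 : (('|' : Char) == ch) = false := by rw [beq_eq_false_iff_ne]; exact fun hh => h9 hh.symm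
  have c10 : (('.' : Char) == ch) = false := by rw [beq_eq_false_iff_ne]; exact fun hh => h10 hh.symm
  simp [PySem.Dict.getD_eq_get?_getD, chMap, hd,
    c1, c2, c3, c4, c5, c6, c7, c8, c9, c10, h1, h2, h3, h4, h5, h6, h7, h8, h9, h10,
    PySem.Dict.get?]

theorem Bcore_eq (name : String) :
    (valid_dir_or_filename_alt name).toList
      = pyRstripSpace (name.toList.flatMap chMap) := by
  have tl : ∀ (L : List Char), (String.mk L).toList = L :=
    fun L => Eq.symm ((fun {l} {s} => String.ofList_eq.mp) rfl)
  simp only [valid_dir_or_filename_alt]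
  rw [PySem.List.foldl_append_singleton_eq_map]
  simp only [tl, PySem.Str.toList_join]
  rw [show ("" : String).toList = [] from rfl]
  rw [charsJoin_nil_flatten]
  simp only [List.nil_append, List.map_map]
  congr 1
  rw [List.flatMap_def]
  exact congrArg List.flatten (List.map_congr_left (fun ch _ => getD_toList ch))

theorem remove_eq_rstrip : ∀ (r : List Char),
    remove_last_if_its_a_space r.reverse =
      (if r.dropWhile (fun c => c = ' ') = [] then none
       else some ((r.dropWhile (fun c => c = ' ')).reverse)) := by
  intro r
  induction r with
  | nil =>
    rw [remove_last_if_its_a_space]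
    rfl
  | cons c t ih =>
    have hg : PySem.List.pyGet? (c :: t).reverse (-1) = some c := by
      rw [PySem.List.pyGet?_neg_one]; simp
    rw [remove_last_if_its_a_space]
    split
    · next heq => rw [hg] at heq; exact absurd heq (by simp)
    · next c1 heq =>
      rw [hg] at heq
      injection heq with heq; subst heq
      rw [PySem.List.slice_to_neg_one]
      by_cases hc : c = ' '
      · subst hc
        rw [if_pos rfl]
        have hdl : (' ' :: t).reverse.dropLast = t.reverse := by simp
        rw [hdl, ih]
        simp
      · rw [if_neg hc]
        have : List.dropWhile (fun c => decide (c = ' ')) (c :: t) = c :: t := by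
          simp [hc]
        simp [this]

-- ===== VERDICT (by name: the statement is the Claim_ definition above) =====
theorem valid_dir_or_filename_spec : Claim_equal_valid_dir_or_filename := by
  intro name _ hpre
  unfold Spec_valid_dir_or_filename
  unfold Pre_valid_dir_or_filename at hpre
  simp only [List.any_eq_true, Bool.not_eq_true'] at hpre
  obtain ⟨c0, hc0, hk⟩ := hpre
  -- the sanitized core contains a non-space character
  have hns : ∃ x ∈ name.toList.flatMap chMap, x ≠ ' ' := by
    simp only [List.contains_eq_mem, List.mem_cons, List.not_mem_nil, or_false,
      decide_eq_false_iff_not, not_or] at hk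
    obtain ⟨k1, k2, k3, k4, k5, k6, k7, k8, k9, k10⟩ := hk
    by_cases h : c0 = '/'
    · exact ⟨'o', List.mem_flatMap.mpr ⟨c0, hc0, by subst h; decide⟩, by decide⟩
    · exact ⟨c0, List.mem_flatMap.mpr ⟨c0, hc0, by
        simp [chMap, k2, h, k3, k4, k5, k6, k7, k8, k9, k10]⟩, k1⟩
  have hstrip := remove_eq_rstrip (name.toList.flatMap chMap).reverse
  rw [List.reverse_reverse] at hstrip
  have hne : (name.toList.flatMap chMap).reverse.dropWhile (fun c => decide (c = ' ')) ≠ [] := by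
    intro hnil
    rw [List.dropWhile_eq_nil_iff] at hnil
    obtain ⟨x, hx, hxs⟩ := hns
    exact hxs (by simpa using hnil x (List.mem_reverse.mpr hx))
  have hA : valid_dir_or_filename name
      = String.mk (((name.toList.flatMap chMap).reverse.dropWhile (fun c => decide (c = ' '))).reverse) := by
    simp only [valid_dir_or_filename]
    rw [Acore_eq, hstrip, if_neg hne]
  have hB : valid_dir_or_filename_alt name
      = String.mk (pyRstripSpace (name.toList.flatMap chMap)) := by
    rw [← Bcore_eq name]
    exact String.ofList_toList.symm
  rw [hA, hB]
  rfl
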